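-- pv_equiv track=rewrite | github.com/benchurch716/SoftwareEngineering-GroupProject | task.py | _convert_hex
-- ===== SOURCE A (Python) =====
-- def _map_char_value(digit):
--     values = {'0': 0, '1': 1, '2': 2, '3': 3, '4': 4, '5': 5, '6': 6, '7': 7,
--               '8': 8, '9': 9, 'A': 10, 'B': 11, 'C': 12, 'D': 13, 'E': 14,
--               'F': 15}
--     return values[digit.upper()]
--
-- def _convert_hex(num_str, isPositive):
--     result = 0
--     # remove "0x" prefix
--     num_str = num_str[2:]
--     # loop through string and convert each digit
--     places_count = len(num_str)
--     for digit in num_str: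
--         result += _map_char_value(digit) * (16 ** (places_count-1))
--         places_count = places_count - 1
--     # return result
--     if isPositive:
--         return result
--     else:
--         return result * -1
-- ===== SOURCE B (Python) =====
-- def _convert_hex(num_str, isPositive):
--     value = 0
--     # Horner's method over the digits after the two-char prefix:
--     # no positional counter, no exponentiation.
--     for digit in num_str[2:]:
--         value = value * 16 + "0123456789abcdef".index(digit.lower())
--     return value if isPositive else -value
-- ===== Notes on version B (the rewrite author's own statement) =====
-- stated objective: simpler
-- what changed: Replaces the positional power-sum (running places counter and a 16**(places-1) exponentiation per digit, via a dict lookup) with Horner's method (value = value*16 + digit) using a string index lookup, dropping the counter and all exponentiations.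
import Mathlib
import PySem

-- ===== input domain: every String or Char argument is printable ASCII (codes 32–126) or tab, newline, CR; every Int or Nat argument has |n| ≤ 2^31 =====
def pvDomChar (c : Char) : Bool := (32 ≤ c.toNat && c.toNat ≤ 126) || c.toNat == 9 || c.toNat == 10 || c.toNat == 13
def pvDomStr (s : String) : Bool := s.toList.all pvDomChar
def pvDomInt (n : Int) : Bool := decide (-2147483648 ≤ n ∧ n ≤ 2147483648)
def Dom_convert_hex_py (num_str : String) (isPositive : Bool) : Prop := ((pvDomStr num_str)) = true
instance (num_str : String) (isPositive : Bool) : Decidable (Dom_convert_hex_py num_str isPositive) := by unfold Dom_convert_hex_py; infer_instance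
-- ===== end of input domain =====

-- B replaces A's positional power-sum (places counter + 16**(places-1) per digit, dict lookup)
-- with Horner's method and a string-index digit lookup: simpler, no counter, no exponentiation.


-- ===== PORT A =====
-- _map_char_value's dict; on non-hex digits Python raises KeyError — such inputs
-- are excluded by Pre_convert_hex_py, so the total form uses getD 0 there.
def pvHexDict : PySem.Dict Char Int :=
  PySem.Dict.ofList [('0',0),('1',1),('2',2),('3',3),('4',4),('5',5),('6',6),('7',7),
                     ('8',8),('9',9),('A',10),('B',11),('C',12),('D',13),('E',14),('F',15)]

def pvMapCharValueA (digit : Char) : Int :=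
  (pvHexDict.get? (PySem.Chars.upperChar digit)).getD 0

def convert_hex_py (num_str : String) (isPositive : Bool) : Int :=
  -- num_str = num_str[2:]  (drop 2 is exact for Python s[2:])
  let s := num_str.toList.drop 2
  -- places_count = len(num_str); for digit in num_str: result += map(digit)*16**(places_count-1); places_count -= 1
  let st := s.foldl (fun (st : Int × Nat) d =>
      (st.1 + pvMapCharValueA d * (16 : Int) ^ (st.2 - 1), st.2 - 1)) (0, s.length)
  if isPositive then st.1 else st.1 * -1

-- ===== PORT B =====
def pvHexChars : List Char := "0123456789abcdef".toList

-- "0123456789abcdef".index(digit.lower()); ValueError (no match) excluded by Pre_, getD 0 there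
def pvMapCharValueB (digit : Char) : Int :=
  ((PySem.List.index? pvHexChars (PySem.Chars.lowerChar digit)).getD 0 : Nat)

def convert_hex_py_alt (num_str : String) (isPositive : Bool) : Int :=
  let v := (num_str.toList.drop 2).foldl (fun v d => v * 16 + pvMapCharValueB d) 0
  if isPositive then v else -v

-- ===== PRECONDITION & SPEC =====
-- Pre_ excludes exactly the inputs where A raises KeyError (a non-hex character
-- after the two-character prefix); B raises ValueError there too.
def pvHexDigits : List Char :=
  ['0','1','2','3','4','5','6','7','8','9','a','b','c','d','e','f',
   'A','B','C','D','E','F']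

def Pre_convert_hex_py (num_str : String) (isPositive : Bool) : Prop :=
  ((num_str.toList.drop 2).all (fun c => pvHexDigits.contains c)) = true

instance (num_str : String) (isPositive : Bool) : Decidable (Pre_convert_hex_py num_str isPositive) := by
  unfold Pre_convert_hex_py; infer_instance

def pvWitness_convert_hex_py : String × Bool := ("0x1aF", true)

def Spec_convert_hex_py (num_str : String) (isPositive : Bool) (out : Int) : Prop := out = convert_hex_py_alt num_str isPositive
instance (num_str : String) (isPositive : Bool) (out : Int) : Decidable (Spec_convert_hex_py num_str isPositive out) := by unfold Spec_convert_hex_py; infer_instance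

-- ===== CLAIM (what is proved, stated in full; the proofs are below) =====
def Claim_equal_convert_hex_py : Prop := ∀ (num_str : String) (isPositive : Bool), Dom_convert_hex_py num_str isPositive → Pre_convert_hex_py num_str isPositive → Spec_convert_hex_py num_str isPositive (convert_hex_py num_str isPositive)

-- ===== LEMMAS AND PROOFS =====

-- the two digit maps agree on hex characters
theorem pvMap_eq (c : Char) (h : pvHexDigits.contains c = true) :
    pvMapCharValueA c = pvMapCharValueB c := by
  simp only [pvHexDigits, List.contains_eq_mem, List.mem_cons, List.not_mem_nil,
    or_false, decide_eq_true_eq] at h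
  rcases h with rfl|rfl|rfl|rfl|rfl|rfl|rfl|rfl|rfl|rfl|rfl|rfl|rfl|rfl|rfl|rfl|rfl|rfl|rfl|rfl|rfl|rfl <;> decide

-- Horner fold from r equals r·16^len plus the fold from 0
theorem pvHorner_shift (m : Char → Int) :
    ∀ (l : List Char) (r : Int),
      l.foldl (fun v c => v * 16 + m c) r
        = r * (16 : Int) ^ l.length + l.foldl (fun v c => v * 16 + m c) 0 := by
  intro l
  induction l with
  | nil => intro r; simp
  | cons c t ih =>
      intro r
      simp only [List.foldl_cons, List.length_cons]
      rw [ih (r * 16 + m c), ih (0 * 16 + m c)]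
      ring

-- A's positional fold (state = (result, places_count)) started at (r, len)
-- equals r plus B's Horner fold
theorem pvPos_eq_horner (m : Char → Int) :
    ∀ (l : List Char) (r : Int),
      (l.foldl (fun (st : Int × Nat) d => (st.1 + m d * (16 : Int) ^ (st.2 - 1), st.2 - 1)) (r, l.length)).1
        = r + l.foldl (fun v c => v * 16 + m c) 0 := by
  intro l
  induction l with
  | nil => intro r; simp
  | cons c t ih =>
      intro r
      simp only [List.foldl_cons, List.length_cons, Nat.add_sub_cancel]
      rw [ih (r + m c * (16 : Int) ^ t.length)]
      rw [pvHorner_shift m t (0 * 16 + m c)]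
      ring

-- A's fold with map A equals the same fold with map B when every element is hex
theorem pvPos_congr (l : List Char)
    (h : ∀ c ∈ l, pvMapCharValueA c = pvMapCharValueB c) :
    ∀ (st : Int × Nat),
      l.foldl (fun (st : Int × Nat) d => (st.1 + pvMapCharValueA d * (16 : Int) ^ (st.2 - 1), st.2 - 1)) st
        = l.foldl (fun (st : Int × Nat) d => (st.1 + pvMapCharValueB d * (16 : Int) ^ (st.2 - 1), st.2 - 1)) st := by
  induction l with
  | nil => intro st; rfl
  | cons c t ih =>
      intro st
      simp only [List.foldl_cons]
      rw [h c (List.mem_cons_self ..)]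
      exact ih (fun x hx => h x (List.mem_cons_of_mem _ hx)) _

-- ===== VERDICT (by name: the statement is the Claim_ definition above) =====
theorem convert_hex_py_spec : Claim_equal_convert_hex_py := by
  intro num_str isPositive _ hpre
  unfold Spec_convert_hex_py convert_hex_py convert_hex_py_alt
  unfold Pre_convert_hex_py at hpre
  simp only [List.all_eq_true] at hpre
  have hmap : ∀ c ∈ num_str.toList.drop 2, pvMapCharValueA c = pvMapCharValueB c :=
    fun c hc => pvMap_eq c (hpre c hc)
  simp only
  rw [pvPos_congr _ hmap, pvPos_eq_horner pvMapCharValueB]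
  split <;> ring
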